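-- pv_equiv track=rewrite | github.com/genzgd/Lampost-Mud | lampmud/model/item.py | gen_keys
-- ===== SOURCE A (Python) =====
-- import math
--
-- def gen_keys(target_id):
--     if not target_id:
--         return
--     target_tuple = tuple(target_id.lower().split(" "))
--     prefix_count = len(target_tuple) - 1
--     target = target_tuple[prefix_count],
--     for x in range(int(math.pow(2, prefix_count))):
--         next_prefix = []
--         for y in range(prefix_count):
--             if int(math.pow(2, y)) & x:
--                 next_prefix.append(target_tuple[y])
--         yield tuple(next_prefix) + target
-- ===== SOURCE B (Python) =====
-- def gen_keys(target_id):
--     if not target_id: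
--         return
--     words = target_id.lower().split(" ")
--     *prefix_words, last = words
--     results = [()]
--     for word in prefix_words:
--         results = results + [s + (word,) for s in results]
--     for s in results:
--         yield s + (last,)
-- ===== Notes on version B (the rewrite author's own statement) =====
-- stated objective: simpler
-- what changed: Replaces the bitmask enumeration (range over 2^n with math.pow and an inner bit-testing loop picking words) by an iterative-doubling subset accumulator: results starts at [()] and each prefix word appends its extensions, reproducing the same binary-counting order with no float/bit arithmetic.
import Mathlib
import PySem

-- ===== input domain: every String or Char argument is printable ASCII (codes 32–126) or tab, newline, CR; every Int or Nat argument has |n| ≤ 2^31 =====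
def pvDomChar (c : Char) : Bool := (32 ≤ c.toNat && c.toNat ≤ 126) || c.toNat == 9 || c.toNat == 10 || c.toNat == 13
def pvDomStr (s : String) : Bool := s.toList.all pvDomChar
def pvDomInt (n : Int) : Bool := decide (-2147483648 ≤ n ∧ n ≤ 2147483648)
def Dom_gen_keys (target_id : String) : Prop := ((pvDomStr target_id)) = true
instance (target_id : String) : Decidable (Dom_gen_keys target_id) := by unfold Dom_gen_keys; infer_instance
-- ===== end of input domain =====

-- B replaces A's bitmask enumeration (for each x < 2^n pick words by the bits of x) with an
-- iterative-doubling subset accumulator; same output in the same order, objective: simpler.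

-- ===== PORT A =====
-- `int(math.pow(2, k))` is ported as `2 ^ k` (exact wherever the float power is exact, i.e. on
-- every input either program can feasibly enumerate).  The generator is ported as the list of
-- its yielded values; `target_tuple[y]` is in range, ported with `getD`.
def gen_keys (target_id : String) : List (List String) :=
  if target_id = "" then []
  else
    let target_tuple := (PySem.Str.split? (PySem.Str.lower target_id) " ").getD []
    let prefix_count := target_tuple.length - 1
    let target := [target_tuple.getD prefix_count ""]
    (List.range (2 ^ prefix_count)).map (fun x =>
      ((List.range prefix_count).foldl (fun next_prefix y =>
          if 2 ^ y &&& x ≠ 0 then next_prefix ++ [target_tuple.getD y ""] else next_prefix)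
        []) ++ target)

-- ===== PORT B =====
def gen_keys_alt (target_id : String) : List (List String) :=
  if target_id = "" then []
  else
    let words := (PySem.Str.split? (PySem.Str.lower target_id) " ").getD []
    let prefix_words := words.take (words.length - 1)
    let last := words.getD (words.length - 1) ""
    let results := prefix_words.foldl (fun rs w => rs ++ rs.map (fun s => s ++ [w])) [[]]
    results.map (fun s => s ++ [last])

-- ===== PRECONDITION & SPEC =====
def Spec_gen_keys (target_id : String) (out : List (List String)) : Prop := out = gen_keys_alt target_id
instance (target_id : String) (out : List (List String)) : Decidable (Spec_gen_keys target_id out) := by unfold Spec_gen_keys; infer_instance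

-- ===== CLAIM (what is proved, stated in full; the proofs are below) =====
def Claim_equal_gen_keys : Prop := ∀ (target_id : String), Dom_gen_keys target_id → Spec_gen_keys target_id (gen_keys target_id)

-- ===== LEMMAS AND PROOFS =====

-- A's inner loop: the sub-list of `ws` selected by the bits of `x` (word 0 = least significant).
def pvSel (ws : List String) (x : Nat) : List String :=
  (List.range ws.length).foldl (fun acc y => if 2 ^ y &&& x ≠ 0 then acc ++ [ws.getD y ""] else acc) []

-- B's doubling accumulator.
def pvDouble (ws : List String) : List (List String) :=
  ws.foldl (fun rs w => rs ++ rs.map (fun s => s ++ [w])) [[]]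

theorem pvAnd_ne_iff (x y : Nat) : (2 ^ y &&& x ≠ 0) ↔ x.testBit y := by
  cases h : x.testBit y <;> simp [Nat.two_pow_and, h]

theorem pvSel_append_low (ws : List String) (w : String) (x : Nat) (hx : x < 2 ^ ws.length) :
    pvSel (ws ++ [w]) x = pvSel ws x := by
  unfold pvSel
  rw [List.length_append, List.length_cons, List.length_nil, List.range_succ, List.foldl_append]
  have hbit : x.testBit ws.length = false := Nat.testBit_lt_two_pow hx
  simp only [List.foldl_cons, List.foldl_nil, pvAnd_ne_iff, hbit, if_neg Bool.false_ne_true]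
  exact PySem.List.foldl_congr_mem _ _ _ _ (fun acc y hy => by
    have hy' : y < ws.length := List.mem_range.mp hy
    rw [List.getD_eq_getElem?_getD, List.getD_eq_getElem?_getD,
      List.getElem?_append_left hy'])

theorem pvSel_append_high (ws : List String) (w : String) (x : Nat) (hx : x < 2 ^ ws.length) :
    pvSel (ws ++ [w]) (2 ^ ws.length + x) = pvSel ws x ++ [w] := by
  unfold pvSel
  rw [List.length_append, List.length_cons, List.length_nil, List.range_succ, List.foldl_append]
  have hbit : (2 ^ ws.length + x).testBit ws.length = true := by
    rw [Nat.testBit_two_pow_add_eq, Nat.testBit_lt_two_pow hx]; rfl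
  have hlast : (ws ++ [w]).getD ws.length "" = w := by
    rw [List.getD_eq_getElem?_getD, List.getElem?_append_right (le_refl _)]
    simp
  simp only [List.foldl_cons, List.foldl_nil, pvAnd_ne_iff, hbit, if_pos trivial, hlast]
  congr 1
  exact PySem.List.foldl_congr_mem _ _ _ _ (fun acc y hy => by
    have hy' : y < ws.length := List.mem_range.mp hy
    rw [Nat.testBit_two_pow_add_gt hy', List.getD_eq_getElem?_getD,
      List.getD_eq_getElem?_getD, List.getElem?_append_left hy'])

theorem pvMain (ws : List String) :
    (List.range (2 ^ ws.length)).map (pvSel ws) = pvDouble ws := by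
  induction ws using List.reverseRecOn with
  | nil => simp [pvSel, pvDouble, List.range_one]
  | append_singleton ws w ih =>
    have hlen : (ws ++ [w]).length = ws.length + 1 := by simp
    rw [hlen, pow_succ, mul_two, List.range_add, List.map_append, List.map_map]
    have h1 : (List.range (2 ^ ws.length)).map (pvSel (ws ++ [w])) =
        (List.range (2 ^ ws.length)).map (pvSel ws) := by
      exact List.map_congr_left (fun x hx => pvSel_append_low ws w x (List.mem_range.mp hx))
    have h2 : (List.range (2 ^ ws.length)).map (pvSel (ws ++ [w]) ∘ (fun y => 2 ^ ws.length + y)) =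
        ((List.range (2 ^ ws.length)).map (pvSel ws)).map (fun s => s ++ [w]) := by
      rw [List.map_map]
      exact List.map_congr_left (fun x hx =>
        pvSel_append_high ws w x (List.mem_range.mp hx))
    rw [h1, h2, ih]
    unfold pvDouble
    rw [List.foldl_append, List.foldl_cons, List.foldl_nil]

theorem pvSel_take (tt : List String) (p : Nat) (hp : p ≤ tt.length) (x : Nat) :
    (List.range p).foldl (fun acc y => if 2 ^ y &&& x ≠ 0 then acc ++ [tt.getD y ""] else acc) []
      = pvSel (tt.take p) x := by
  unfold pvSel
  rw [List.length_take, Nat.min_eq_left hp]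
  exact PySem.List.foldl_congr_mem _ _ _ _ (fun acc y hy => by
    have hy' : y < p := List.mem_range.mp hy
    rw [List.getD_eq_getElem?_getD, List.getD_eq_getElem?_getD, List.getElem?_take,
      if_pos hy'])

-- ===== VERDICT (by name: the statement is the Claim_ definition above) =====
theorem gen_keys_spec : Claim_equal_gen_keys := by
  intro target_id _
  unfold Spec_gen_keys gen_keys gen_keys_alt
  by_cases h : target_id = ""
  · simp [h]
  · simp only [if_neg h]
    set tt := (PySem.Str.split? (PySem.Str.lower target_id) " ").getD [] with htt
    have hp : tt.length - 1 ≤ tt.length := Nat.sub_le _ _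
    calc (List.range (2 ^ (tt.length - 1))).map (fun x =>
            ((List.range (tt.length - 1)).foldl (fun acc y =>
              if 2 ^ y &&& x ≠ 0 then acc ++ [tt.getD y ""] else acc) [])
            ++ [tt.getD (tt.length - 1) ""])
        = ((List.range (2 ^ (tt.length - 1))).map (pvSel (tt.take (tt.length - 1)))).map
            (fun s => s ++ [tt.getD (tt.length - 1) ""]) := by
          rw [List.map_map]
          exact List.map_congr_left (fun x _ => by
            simp only [Function.comp]; rw [pvSel_take tt _ hp x])
      _ = (pvDouble (tt.take (tt.length - 1))).map (fun s => s ++ [tt.getD (tt.length - 1) ""]) := by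
          have := pvMain (tt.take (tt.length - 1))
          rw [List.length_take, Nat.min_eq_left hp] at this
          rw [this]
      _ = _ := rfl
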